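-- pv_equiv track=rewrite | github.com/italofelipe/auraxis-platform | ai_squad/tools/project_tools.py | _extract_pending_block
-- ===== SOURCE A (Python) =====
-- _ORDERED_LIST_PREFIXES = ("1.", "2.", "3.", "4.", "5.")
--
-- _PENDING_BLOCK_MARKER = "Pendencias de execucao imediata"
--
-- def _extract_pending_block(lines: list[str]) -> list[str]:
--     """Return the 'Pendencias de execucao imediata' ordered-list block."""
--     block: list[str] = []
--     in_block = False
--     for line in lines:
--         if _PENDING_BLOCK_MARKER in line:
--             in_block = True
--             block.append(line)
--             continue
--         if in_block:
--             if line.strip() == "" and any(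
--                 item.startswith(_ORDERED_LIST_PREFIXES) for item in block
--             ):
--                 break
--             block.append(line)
--     return block
-- ===== SOURCE B (Python) =====
-- _ORDERED_LIST_PREFIXES = ("1.", "2.", "3.", "4.", "5.")
--
-- _PENDING_BLOCK_MARKER = "Pendencias de execucao imediata"
--
--
-- def _extract_pending_block(lines):
--     """Three staged index searches plus slicing: find the marker line, then the
--     first ordered-list item after it, then the terminating blank line; no
--     accumulator and no rescanning."""
--     start = next((i for i, l in enumerate(lines) if _PENDING_BLOCK_MARKER in l), None)
--     if start is None:
--         return []
--     return _trim_block(lines[start:])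
--
--
-- def _trim_block(tail):
--     first_item = next((i for i, l in enumerate(tail) if l.startswith(_ORDERED_LIST_PREFIXES)), None)
--     if first_item is None:
--         return tail
--     stop = next((j for j, l in enumerate(tail)
--                  if j > first_item and _PENDING_BLOCK_MARKER not in l and l.strip() == ""), None)
--     if stop is None:
--         return tail
--     return tail[:stop]
-- ===== Notes on version B (the rewrite author's own statement) =====
-- stated objective: alternative
-- what changed: B replaces A's single accumulator loop (which rescans the whole collected block at every blank line) with three staged index searches - marker line, first ordered-list item, terminating blank line after it - and returns a slice of the input; no accumulator and no rescanning.
import Mathlib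
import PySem

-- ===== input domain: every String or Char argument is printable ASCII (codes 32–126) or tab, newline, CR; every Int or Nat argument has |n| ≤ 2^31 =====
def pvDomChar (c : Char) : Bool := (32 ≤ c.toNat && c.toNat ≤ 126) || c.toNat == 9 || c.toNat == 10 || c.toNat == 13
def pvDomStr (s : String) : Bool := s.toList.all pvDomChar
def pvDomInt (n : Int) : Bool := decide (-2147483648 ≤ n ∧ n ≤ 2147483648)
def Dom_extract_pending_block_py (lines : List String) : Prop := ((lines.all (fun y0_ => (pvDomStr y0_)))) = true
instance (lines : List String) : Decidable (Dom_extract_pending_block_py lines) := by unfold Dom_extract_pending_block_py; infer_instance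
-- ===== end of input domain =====

-- B computes the block by three staged index searches (marker line, first ordered item, terminating blank line) and slicing, instead of A's single accumulator loop that rescans the collected block at every blank line (alternative structure, same output).


-- ===== PORT A =====
def pvMarker : String := "Pendencias de execucao imediata"
def pvPrefixes : List String := ["1.", "2.", "3.", "4.", "5."]

-- line.startswith(_ORDERED_LIST_PREFIXES): a tuple argument means "any of these prefixes"
def pvStartsAny (line : String) : Bool := pvPrefixes.any (fun p => PySem.Str.startswith line p)

-- A's loop: state = (block, in_block); 'break' returns block immediately
def extract_pending_block_py.go : List String → List String → Bool → List String
  | [], block, _ => block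
  | line :: rest, block, inb =>
    if PySem.Str.isIn pvMarker line then
      extract_pending_block_py.go rest (block ++ [line]) true
    else if inb then
      if PySem.Str.strip line = "" ∧ block.any pvStartsAny then block
      else extract_pending_block_py.go rest (block ++ [line]) inb
    else extract_pending_block_py.go rest block inb

def extract_pending_block_py (lines : List String) : List String :=
  extract_pending_block_py.go lines [] false

-- ===== PORT B =====
-- next((i for i, l in enumerate(xs) if p(i, l)), None): first index satisfying p
def pvFindIdx (p : Nat → String → Bool) : List String → Nat → Option Nat
  | [], _ => none
  | l :: rest, i => if p i l then some i else pvFindIdx p rest (i + 1)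

-- _trim_block(tail): first ordered item, then terminating blank line after it, then slice
def pvTrimBlock (tail : List String) : List String :=
  match pvFindIdx (fun _ l => pvStartsAny l) tail 0 with
  | none => tail
  | some firstItem =>
    match pvFindIdx
        (fun j l => decide (firstItem < j)
          && (!(PySem.Str.isIn pvMarker l) && (PySem.Str.strip l == ""))) tail 0 with
    | none => tail
    | some stop => tail.take stop

def extract_pending_block_py_alt (lines : List String) : List String :=
  match pvFindIdx (fun _ l => PySem.Str.isIn pvMarker l) lines 0 with
  | none => []
  | some start => pvTrimBlock (lines.drop start)

-- ===== PRECONDITION & SPEC =====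
def Spec_extract_pending_block_py (lines : List String) (out : List String) : Prop := out = extract_pending_block_py_alt lines
instance (lines : List String) (out : List String) : Decidable (Spec_extract_pending_block_py lines out) := by unfold Spec_extract_pending_block_py; infer_instance

-- ===== CLAIM (what is proved, stated in full; the proofs are below) =====
def Claim_equal_extract_pending_block_py : Prop := ∀ (lines : List String), Dom_extract_pending_block_py lines → Spec_extract_pending_block_py lines (extract_pending_block_py lines)

-- ===== LEMMAS AND PROOFS =====

-- proof-only intermediate: A's in-block phase, with seen = block.any pvStartsAny
def pvPhase2 : List String → Bool → List String
  | [], _ => []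
  | l :: rs, seen =>
    if !(PySem.Str.isIn pvMarker l) && seen && (PySem.Str.strip l == "") then []
    else l :: pvPhase2 rs (seen || pvStartsAny l)

-- proof-only: B's trimming once an ordered item has already been seen
def pvTrimSeen (tail : List String) : List String :=
  match pvFindIdx (fun _ l => !(PySem.Str.isIn pvMarker l) && (PySem.Str.strip l == "")) tail 0 with
  | none => tail
  | some stop => tail.take stop

-- shift lemma for an index-free predicate
theorem pvFindIdx_shift' (P : String → Bool) :
    ∀ (xs : List String) (n : Nat),
      pvFindIdx (fun _ l => P l) xs (n + 1) = (pvFindIdx (fun _ l => P l) xs n).map (· + 1) := by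
  intro xs
  induction xs with
  | nil => intro n; rfl
  | cons l rs ih =>
    intro n
    simp only [pvFindIdx]
    by_cases h : P l = true
    · simp [h]
    · simp only [h, Bool.false_eq_true, if_neg, not_false_iff, ih]

-- shift lemma for the "index greater than k" stop predicate
theorem pvFindIdx_gt_shift (k : Nat) (P : String → Bool) :
    ∀ (xs : List String) (n : Nat),
      pvFindIdx (fun j l => decide (k + 1 < j) && P l) xs (n + 1)
        = (pvFindIdx (fun j l => decide (k < j) && P l) xs n).map (· + 1) := by
  intro xs
  induction xs with
  | nil => intro n; rfl
  | cons l rs ih =>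
    intro n
    simp only [pvFindIdx]
    have hd : decide (k + 1 < n + 1) = decide (k < n) := by simp
    simp only [hd]
    by_cases h : (decide (k < n) && P l) = true
    · simp [h]
    · simp only [h, Bool.false_eq_true, if_neg, not_false_iff, ih]

-- once the index is strictly positive, the "0 < j" conjunct is vacuous
theorem pvFindIdx_gt0 (P : String → Bool) :
    ∀ (xs : List String) (n : Nat),
      pvFindIdx (fun j l => decide (0 < j) && P l) xs (n + 1)
        = pvFindIdx (fun _ l => P l) xs (n + 1) := by
  intro xs
  induction xs with
  | nil => intro n; rfl
  | cons l rs ih =>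
    intro n
    simp only [pvFindIdx, Nat.succ_pos, decide_true, Bool.true_and, ih]

-- the index-1 instances used below (indices appear as the literal 1 after one unfolding step)
theorem pvFindIdx_shift_one (P : String → Bool) (xs : List String) :
    pvFindIdx (fun _ l => P l) xs 1 = (pvFindIdx (fun _ l => P l) xs 0).map (· + 1) :=
  pvFindIdx_shift' P xs 0

theorem pvFindIdx_gt0_one (P : String → Bool) (xs : List String) :
    pvFindIdx (fun j l => decide (0 < j) && P l) xs 1 = pvFindIdx (fun _ l => P l) xs 1 :=
  pvFindIdx_gt0 P xs 0

theorem pvFindIdx_gt_shift_one (k : Nat) (P : String → Bool) (xs : List String) :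
    pvFindIdx (fun j l => decide (k + 1 < j) && P l) xs 1
      = (pvFindIdx (fun j l => decide (k < j) && P l) xs 0).map (· + 1) :=
  pvFindIdx_gt_shift k P xs 0

-- pushing the head of the list through the "match on the found index" shape
theorem pvMatchShift (X : Option Nat) (l : String) (rs : List String) :
    (match X.map (· + 1) with
     | none => l :: rs
     | some stop => List.take stop (l :: rs))
      = l :: (match X with | none => rs | some stop => List.take stop rs) := by
  cases X <;> simp

-- A's in-block phase equals B's staged trimming
theorem pvPhase2_eq (tail : List String) :
    ∀ seen : Bool, pvPhase2 tail seen = if seen then pvTrimSeen tail else pvTrimBlock tail := by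
  induction tail with
  | nil => intro seen; cases seen <;> rfl
  | cons l rs ih =>
    intro seen
    simp only [pvPhase2, pvTrimSeen, pvTrimBlock, pvFindIdx]
    cases seen with
    | true =>
      simp only [if_pos]
      by_cases hm : PySem.Chars.isIn pvMarker.toList l.toList = true
      · simp [hm, ih, pvMatchShift, pvFindIdx_shift_one, pvTrimSeen]
      · simp only [Bool.not_eq_true] at hm
        by_cases hb : PySem.Str.strip l = ""
        · simp [hm, hb]
        · simp [hm, hb, ih, pvMatchShift, pvFindIdx_shift_one, pvTrimSeen]
    | false =>
      by_cases hs : pvStartsAny l = true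
      · -- head is the first ordered item: firstItem = 0, the stop search starts right after it
        simp [hs, ih, pvFindIdx_gt0_one, pvFindIdx_shift_one, pvMatchShift, pvTrimSeen]
      · -- head is not an ordered item: both searches shift by one
        simp only [Bool.not_eq_true] at hs
        simp only [hs, Bool.and_false, Bool.false_and, Bool.false_eq_true, if_neg, not_false_iff,
          Bool.false_or, ih]
        rw [pvFindIdx_shift_one (fun l => pvStartsAny l) rs]
        cases hfi : pvFindIdx (fun _ l => pvStartsAny l) rs 0 with
        | none => simp [pvTrimBlock, hfi]
        | some p =>
          simp [pvTrimBlock, hfi, pvFindIdx_gt_shift_one, pvMatchShift]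

-- A's in-block loop equals block ++ pvPhase2, with seen = block.any pvStartsAny
theorem pvGo_inblock (rest : List String) :
    ∀ (block : List String),
      extract_pending_block_py.go rest block true = block ++ pvPhase2 rest (block.any pvStartsAny) := by
  induction rest with
  | nil => intro block; simp [extract_pending_block_py.go, pvPhase2]
  | cons l rs ih =>
    intro block
    simp only [extract_pending_block_py.go, pvPhase2]
    by_cases hm : PySem.Str.isIn pvMarker l = true
    · simp only [hm, if_pos, Bool.not_true, Bool.false_and, Bool.false_eq_true, if_neg,
        not_false_iff, ih, List.any_append, List.any_cons, List.any_nil, Bool.or_false,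
        List.append_assoc, List.cons_append, List.nil_append]
    · simp only [hm, Bool.false_eq_true, if_neg, not_false_iff, if_false, if_pos] at *
      simp only [Bool.not_false, Bool.true_and]
      by_cases hb : (PySem.Str.strip l == "") = true
      · have hs : PySem.Str.strip l = "" := by simpa using hb
        by_cases ha : block.any pvStartsAny = true
        · simp [hs, ha]
        · simp only [Bool.not_eq_true] at ha
          simp only [hs, ha, and_false, if_neg, not_false_iff, Bool.false_eq_true,
            ih, List.any_append, List.any_cons, List.any_nil, Bool.or_false,
            List.append_assoc, List.cons_append, List.nil_append]
          simp [ha, hb]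
      · have hs : ¬ PySem.Str.strip l = "" := by simpa using hb
        simp only [hs, false_and, if_neg, not_false_iff, hb, Bool.and_false, Bool.false_eq_true,
          if_false, ih, List.any_append, List.any_cons, List.any_nil, Bool.or_false,
          List.append_assoc, List.cons_append, List.nil_append]

-- A's whole loop equals: find the marker, then run the in-block phase from there
theorem pvGo_main (lines : List String) :
    extract_pending_block_py.go lines [] false =
      match pvFindIdx (fun _ l => PySem.Str.isIn pvMarker l) lines 0 with
      | none => []
      | some start => pvPhase2 (lines.drop start) false := by
  induction lines with
  | nil => rfl
  | cons l rs ih =>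
    simp only [extract_pending_block_py.go, pvFindIdx]
    by_cases hm : PySem.Str.isIn pvMarker l = true
    · simp only [hm, if_pos, List.nil_append, List.drop_zero]
      rw [pvGo_inblock]
      have h1 : ([l].any pvStartsAny) = pvStartsAny l := by simp
      rw [h1]
      simp [pvPhase2]
    · simp only [hm, Bool.false_eq_true, if_neg, not_false_iff, if_false, ih]
      rw [pvFindIdx_shift' (fun l => PySem.Str.isIn pvMarker l) rs 0]
      cases hf : pvFindIdx (fun _ l => PySem.Str.isIn pvMarker l) rs 0 with
      | none => simp
      | some s => simp

-- ===== VERDICT (by name: the statement is the Claim_ definition above) =====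
theorem extract_pending_block_py_spec : Claim_equal_extract_pending_block_py := by
  intro lines _
  unfold Spec_extract_pending_block_py extract_pending_block_py extract_pending_block_py_alt
  rw [pvGo_main]
  cases hf : pvFindIdx (fun _ l => PySem.Str.isIn pvMarker l) lines 0 with
  | none => rfl
  | some s => simp only [pvPhase2_eq, if_neg, Bool.false_eq_true, not_false_iff]
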